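-- pv_equiv track=rewrite | github.com/slavayosome/TradingAgents | tradingagents/services/account.py | _parse_order_blocks
-- ===== SOURCE A (Python) =====
-- from typing import Any, Dict, List, Optional
--
-- def _parse_order_blocks(text: str) -> List[Dict[str, Any]]:
--     if not text or "No all orders" in text or "No orders" in text:
--         return []
--     blocks = []
--     current: Dict[str, Any] = {}
--     for raw_line in text.splitlines():
--         line = raw_line.strip()
--         if not line:
--             continue
--         if line.startswith("Order ID:") and current:
--             blocks.append(current)
--             current = {}
--         if ":" in line:
--             key, value = line.split(":", 1)
--             current[key.strip().lower().replace(" ", "_")] = value.strip()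
--     if current:
--         blocks.append(current)
--     return blocks
-- ===== SOURCE B (Python) =====
-- from typing import Any, Dict, List
--
--
-- def _parse_order_blocks(text: str) -> List[Dict[str, Any]]:
--     if not text or "No all orders" in text or "No orders" in text:
--         return []
--     # Pass 1: partition the stripped, non-empty lines into groups at "Order ID:" lines.
--     lines = [ln for ln in (raw.strip() for raw in text.splitlines()) if ln]
--     groups: List[List[str]] = [[]]
--     for ln in lines:
--         if ln.startswith("Order ID:") and groups[-1]:
--             groups.append([])
--         groups[-1].append(ln)
--     # Pass 2: turn each group into a dict; later keys overwrite earlier ones.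
--     blocks = []
--     for group in groups:
--         block: Dict[str, Any] = {}
--         for ln in group:
--             if ":" in ln:
--                 key, value = ln.split(":", 1)
--                 block[key.strip().lower().replace(" ", "_")] = value.strip()
--         if block:
--             blocks.append(block)
--     return blocks
-- ===== Notes on version B (the rewrite author's own statement) =====
-- stated objective: alternative
-- what changed: Replaces A's single stateful loop (mutable current-dict with in-loop flushing) by a two-phase pipeline: first partition the stripped non-empty lines into groups at 'Order ID:' boundaries, then map each group to a dict and drop empty dicts.
import Mathlib
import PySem

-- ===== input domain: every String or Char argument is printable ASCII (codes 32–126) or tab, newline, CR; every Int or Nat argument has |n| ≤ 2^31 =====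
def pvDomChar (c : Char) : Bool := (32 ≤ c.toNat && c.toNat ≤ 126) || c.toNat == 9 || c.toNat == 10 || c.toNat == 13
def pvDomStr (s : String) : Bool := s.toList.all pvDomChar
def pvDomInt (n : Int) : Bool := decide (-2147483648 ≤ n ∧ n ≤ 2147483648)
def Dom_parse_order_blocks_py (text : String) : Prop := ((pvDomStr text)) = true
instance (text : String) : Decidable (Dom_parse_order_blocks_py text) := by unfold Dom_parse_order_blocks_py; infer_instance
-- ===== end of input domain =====

-- B replaces A's single stateful loop (mutable current-dict flushed in-loop) by a two-phase
-- pipeline — partition lines into groups, then map groups to dicts — for a clearer decomposition.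

-- ===== PORT A =====
-- key.strip().lower().replace(" ", "_")  (shared: both Pythons contain this same expression)
def pvNormKey (k : String) : String :=
  PySem.Str.replace (PySem.Str.lower (PySem.Str.strip k)) " " "_"

-- `if ":" in line: key, value = line.split(":", 1); d[...] = value.strip()`
-- (shared: this statement occurs verbatim in both Pythons)
def pvAddLine (d : PySem.Dict String String) (line : String) : PySem.Dict String String :=
  if PySem.Str.isIn ":" line then
    match PySem.Str.splitMax? line ":" 1 with
    | some [k, v] => d.insert (pvNormKey k) (PySem.Str.strip v)
    | _ => d
  else d

-- the body after `line = raw_line.strip(); if not line: continue`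
def pvStepA' (st : List (PySem.Dict String String) × PySem.Dict String String) (line : String) :
    List (PySem.Dict String String) × PySem.Dict String String :=
  let st2 := if PySem.Str.startswith line "Order ID:" && !st.2.items.isEmpty then
               (st.1 ++ [st.2], PySem.Dict.empty)
             else st
  (st2.1, pvAddLine st2.2 line)

def pvStepA (st : List (PySem.Dict String String) × PySem.Dict String String) (raw : String) :
    List (PySem.Dict String String) × PySem.Dict String String :=
  let line := PySem.Str.strip raw
  if line = "" then st else pvStepA' st line

def parse_order_blocks_py (text : String) : List (List (String × String)) :=
  if text = "" || PySem.Str.isIn "No all orders" text || PySem.Str.isIn "No orders" text then []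
  else
    let st := (PySem.Str.splitlines text).foldl pvStepA ([], PySem.Dict.empty)
    (if st.2.items.isEmpty then st.1 else st.1 ++ [st.2]).map PySem.Dict.items

-- ===== PORT B =====
-- pass 1 step: open a new group at an "Order ID:" line when the current group is non-empty
def pvGroupStep (st : List (List String) × List String) (ln : String) :
    List (List String) × List String :=
  if PySem.Str.startswith ln "Order ID:" && !st.2.isEmpty then (st.1 ++ [st.2], [ln])
  else (st.1, st.2 ++ [ln])

-- pass 2: a group becomes a dict, later keys overwriting earlier ones
def pvMkBlock (g : List String) : PySem.Dict String String :=
  g.foldl pvAddLine PySem.Dict.empty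

def parse_order_blocks_py_alt (text : String) : List (List (String × String)) :=
  if text = "" || PySem.Str.isIn "No all orders" text || PySem.Str.isIn "No orders" text then []
  else
    let lines := ((PySem.Str.splitlines text).map PySem.Str.strip).filter (fun l => l ≠ "")
    let st := lines.foldl pvGroupStep ([], [])
    (((st.1 ++ [st.2]).map pvMkBlock).filter (fun d => !d.items.isEmpty)).map PySem.Dict.items

-- ===== PRECONDITION & SPEC =====
def Spec_parse_order_blocks_py (text : String) (out : List (List (String × String))) : Prop := out = parse_order_blocks_py_alt text
instance (text : String) (out : List (List (String × String))) : Decidable (Spec_parse_order_blocks_py text out) := by unfold Spec_parse_order_blocks_py; infer_instance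

-- ===== CLAIM (what is proved, stated in full; the proofs are below) =====
def Claim_equal_parse_order_blocks_py : Prop := ∀ (text : String), Dom_parse_order_blocks_py text → Spec_parse_order_blocks_py text (parse_order_blocks_py text)

-- ===== LEMMAS AND PROOFS =====

-- A's loop over the raw lines equals the loop without strip/skip over the cleaned lines.
theorem pv_foldl_stepA (raws : List String)
    (st : List (PySem.Dict String String) × PySem.Dict String String) :
    raws.foldl pvStepA st
      = ((raws.map PySem.Str.strip).filter (fun l => l ≠ "")).foldl pvStepA' st := by
  induction raws generalizing st with
  | nil => rfl
  | cons r rs ih =>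
    simp only [List.foldl_cons, List.map_cons, List.filter_cons, pvStepA]
    by_cases h : PySem.Str.strip r = "" <;> simp [h, ih]

theorem pv_mkBlock_nil : pvMkBlock [] = PySem.Dict.empty := rfl

theorem pv_mkBlock_singleton (ln : String) :
    pvMkBlock [ln] = pvAddLine PySem.Dict.empty ln := rfl

theorem pv_mkBlock_append (g : List String) (ln : String) :
    pvMkBlock (g ++ [ln]) = pvAddLine (pvMkBlock g) ln := by
  simp [pvMkBlock, List.foldl_append]

-- empty items means the dict IS the empty dict
theorem pv_dict_eq_empty (d : PySem.Dict String String) (h : d.items.isEmpty = true) :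
    d = PySem.Dict.empty := by
  apply PySem.Dict.ext
  simpa [List.isEmpty_iff] using h

-- Main invariant: A's state is the image of B's grouping state
-- (blocks = the non-empty dicts of the closed groups, current = the dict of the open group).
theorem pv_invariant (lines : List String) (done : List (List String)) (cur : List String) :
    lines.foldl pvStepA'
        ((done.map pvMkBlock).filter (fun d => !d.items.isEmpty), pvMkBlock cur)
      = (((lines.foldl pvGroupStep (done, cur)).1.map pvMkBlock).filter
            (fun d => !d.items.isEmpty),
          pvMkBlock (lines.foldl pvGroupStep (done, cur)).2) := by
  induction lines generalizing done cur with
  | nil => rfl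
  | cons ln rest ih =>
    simp only [List.foldl_cons]
    have hstep : pvStepA' ((done.map pvMkBlock).filter (fun d => !d.items.isEmpty), pvMkBlock cur) ln
        = (((pvGroupStep (done, cur) ln).1.map pvMkBlock).filter (fun d => !d.items.isEmpty),
            pvMkBlock (pvGroupStep (done, cur) ln).2) := by
      by_cases hs : PySem.Chars.startswith ln.toList ['O','r','d','e','r',' ','I','D',':'] = true
      · by_cases hc : cur = []
        · subst hc
          simp [pvStepA', pvGroupStep, hs, PySem.Dict.empty, pv_mkBlock_nil, pv_mkBlock_singleton]
        · by_cases hd : (pvMkBlock cur).items = []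
          · have he : pvMkBlock cur = PySem.Dict.empty := pv_dict_eq_empty _ (by simp [hd])
            simp [pvStepA', pvGroupStep, hs, hc, he, PySem.Dict.empty, pv_mkBlock_singleton]
          · simp [pvStepA', pvGroupStep, hs, hc, hd, pv_mkBlock_singleton]
      · simp [pvStepA', pvGroupStep, hs, pv_mkBlock_append]
    rw [hstep, ih]

-- ===== VERDICT (by name: the statement is the Claim_ definition above) =====
theorem parse_order_blocks_py_spec : Claim_equal_parse_order_blocks_py := by
  intro text _
  unfold Spec_parse_order_blocks_py parse_order_blocks_py parse_order_blocks_py_alt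
  by_cases hg : (text = "" || PySem.Str.isIn "No all orders" text
      || PySem.Str.isIn "No orders" text) = true
  · rw [if_pos hg, if_pos hg]
  · rw [if_neg hg, if_neg hg]
    rw [pv_foldl_stepA]
    have h0 : (([] : List (PySem.Dict String String)), (PySem.Dict.empty : PySem.Dict String String))
        = ((([] : List (List String)).map pvMkBlock).filter (fun d => !d.items.isEmpty),
           pvMkBlock []) := by rfl
    rw [h0, pv_invariant]
    by_cases hd : (pvMkBlock ((((PySem.Str.splitlines text).map PySem.Str.strip).filter
        (fun l => !decide (l = ""))).foldl pvGroupStep ([], [])).2).items = [] <;>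
      simp [hd]
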